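-- pv_equiv track=rewrite | github.com/DAVEP00L/Scodoc | ScoDoc/app/scodoc/sco_utils.py | abbrev_prenom
-- ===== SOURCE A (Python) =====
-- def abbrev_prenom(prenom):
--     "Donne l'abreviation d'un prenom"
--     # un peu lent, mais espère traiter tous les cas
--     # Jean -> J.
--     # Charles -> Ch.
--     # Jean-Christophe -> J.-C.
--     # Marie Odile -> M. O.
--     prenom = prenom.replace(".", " ").strip()
--     if not prenom:
--         return ""
--     d = prenom[:3].upper()
--     if d == "CHA":
--         abrv = "Ch."  # 'Charles' donne 'Ch.'
--         i = 3
--     else: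
--         abrv = prenom[0].upper() + "."
--         i = 1
--     n = len(prenom)
--     while i < n:
--         c = prenom[i]
--         if c == " " or c == "-" and i < n - 1:
--             sep = c
--             i += 1
--             # gobbe tous les separateurs
--             while i < n and (prenom[i] == " " or prenom[i] == "-"):
--                 if prenom[i] == "-":
--                     sep = "-"
--                 i += 1
--             if i < n:
--                 abrv += sep + prenom[i].upper() + "."
--         i += 1
--     return abrv
-- ===== SOURCE B (Python) =====
-- import re
--
--
-- def abbrev_prenom(prenom):
--     "Donne l'abreviation d'un prenom"
--     prenom = prenom.replace(".", " ").strip()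
--     if not prenom:
--         return ""
--     if prenom[:3].upper() == "CHA":
--         abrv, rest = "Ch.", prenom[3:]
--     else:
--         abrv, rest = prenom[0].upper() + ".", prenom[1:]
--     for m in re.finditer(r"([ -]+)([^ -])", rest):
--         abrv += ("-" if "-" in m.group(1) else " ") + m.group(2).upper() + "."
--     return abrv
-- ===== Notes on version B (the rewrite author's own statement) =====
-- stated objective: idiomatic
-- what changed: Replaces the hand-written index while-loop with nested separator-gobbling and lookahead bounds checks by a single re.finditer pass over the tail matching separator-run-plus-letter groups.
import Mathlib
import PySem

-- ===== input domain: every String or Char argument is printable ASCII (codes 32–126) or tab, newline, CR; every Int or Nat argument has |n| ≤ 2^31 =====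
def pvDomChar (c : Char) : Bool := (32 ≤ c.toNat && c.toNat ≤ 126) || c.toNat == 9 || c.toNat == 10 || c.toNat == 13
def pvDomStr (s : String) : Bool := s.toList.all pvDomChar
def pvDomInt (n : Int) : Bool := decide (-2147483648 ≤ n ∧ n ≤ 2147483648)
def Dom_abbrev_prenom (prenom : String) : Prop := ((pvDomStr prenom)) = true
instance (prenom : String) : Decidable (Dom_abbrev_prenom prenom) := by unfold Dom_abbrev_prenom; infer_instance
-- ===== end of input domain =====

-- B replaces A's index while-loop (with inner gobble loop and lookahead) by one regex-style scan; objective: idiomatic.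

-- ===== PORT A =====
-- inner gobble loop of A: consume separators, remembering '-' if one is seen; returns (sep, remaining suffix)
def pvGobble (sep : Char) : List Char → Char × List Char
  | [] => (sep, [])
  | c :: cs =>
    if c = ' ' || c = '-' then pvGobble (if c = '-' then '-' else sep) cs
    else (sep, c :: cs)

-- termination lemma for the outer loop, cited by decreasing_by
theorem pvGobble_snd_len (sep : Char) (l : List Char) : (pvGobble sep l).2.length ≤ l.length := by
  induction l generalizing sep with
  | nil => simp [pvGobble]
  | cons c cs ih =>
    simp only [pvGobble]
    split
    · exact Nat.le_trans (ih _) (Nat.le_succ _)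
    · simp

-- A's outer while loop over the remaining suffix (i < n ↔ suffix nonempty; i < n-1 ↔ tail nonempty)
def pvALoop : List Char → String → String
  | [], abrv => abrv
  | c :: cs, abrv =>
    if c = ' ' || (c = '-' && !cs.isEmpty) then
      match h : pvGobble c cs with
      | (_, []) => abrv
      | (sep, d :: ds) =>
        pvALoop ds (abrv ++ sep.toString ++ (PySem.Chars.upperChar d).toString ++ ".")
    else pvALoop cs abrv
termination_by l => l.length
decreasing_by
  · have hle := pvGobble_snd_len c cs
    rw [h] at hle
    simp at hle ⊢
    omega
  · simp

def abbrev_prenom (prenom : String) : String :=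
  let p := (PySem.Str.strip (PySem.Str.replace prenom "." " ")).toList
  match p with
  | [] => ""
  | c :: cs =>
    let d := PySem.Chars.upper ((c :: cs).take 3)
    if d = ['C', 'H', 'A'] then pvALoop ((c :: cs).drop 3) "Ch."
    else pvALoop cs ((PySem.Chars.upperChar c).toString ++ ".")

-- ===== PORT B =====
-- the finditer scan: state none = looking for a separator run, some sep = inside a run whose merged separator is sep
def pvBScan : Option Char → List Char → String
  | _, [] => ""
  | none, c :: cs =>
    if c = ' ' || c = '-' then pvBScan (some c) cs else pvBScan none cs
  | some sep, c :: cs =>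
    if c = ' ' || c = '-' then pvBScan (some (if c = '-' then '-' else sep)) cs
    else (if sep = '-' then "-" else " ") ++ (PySem.Chars.upperChar c).toString ++ "." ++ pvBScan none cs

def abbrev_prenom_alt (prenom : String) : String :=
  let p := (PySem.Str.strip (PySem.Str.replace prenom "." " ")).toList
  match p with
  | [] => ""
  | c :: cs =>
    let hr :=
      if PySem.Chars.upper ((c :: cs).take 3) = ['C', 'H', 'A'] then ("Ch.", (c :: cs).drop 3)
      else ((PySem.Chars.upperChar c).toString ++ ".", cs)
    hr.1 ++ pvBScan none hr.2

-- ===== PRECONDITION & SPEC =====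
def Spec_abbrev_prenom (prenom : String) (out : String) : Prop := out = abbrev_prenom_alt prenom
instance (prenom : String) (out : String) : Decidable (Spec_abbrev_prenom prenom out) := by unfold Spec_abbrev_prenom; infer_instance

-- ===== CLAIM (what is proved, stated in full; the proofs are below) =====
def Claim_equal_abbrev_prenom : Prop := ∀ (prenom : String), Dom_abbrev_prenom prenom → Spec_abbrev_prenom prenom (abbrev_prenom prenom)

-- ===== LEMMAS AND PROOFS =====

-- gobble keeps the separator in {' ', '-'}
theorem pvGobble_fst_mem (sep : Char) (l : List Char) (hs : sep = ' ' ∨ sep = '-') :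
    (pvGobble sep l).1 = ' ' ∨ (pvGobble sep l).1 = '-' := by
  induction l generalizing sep with
  | nil => simpa [pvGobble] using hs
  | cons c cs ih =>
    simp only [pvGobble]
    split
    · exact ih _ (by split <;> simp [hs])
    · simpa using hs

theorem sep_toString (sep : Char) (hs : sep = ' ' ∨ sep = '-') :
    sep.toString = (if sep = '-' then "-" else " ") := by
  rcases hs with h | h <;> subst h <;> rfl

-- B's in-run state computes exactly A's gobble
theorem pvBScan_some (sep : Char) (l : List Char) (hs : sep = ' ' ∨ sep = '-') :
    pvBScan (some sep) l =
      match pvGobble sep l with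
      | (_, []) => ""
      | (s, d :: ds) =>
          (if s = '-' then "-" else " ") ++ (PySem.Chars.upperChar d).toString ++ "." ++ pvBScan none ds := by
  induction l generalizing sep with
  | nil => simp [pvBScan, pvGobble]
  | cons c cs ih =>
    simp only [pvBScan, pvGobble]
    split
    · exact ih _ (by split <;> simp [hs])
    · simp

-- the main loop invariant: A's loop is the accumulator ++ B's scan
theorem pvALoop_eq (l : List Char) (abrv : String) : pvALoop l abrv = abrv ++ pvBScan none l := by
  induction hn : l.length using Nat.strong_induction_on generalizing l abrv with
  | _ n ih =>
  subst hn
  match l with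
  | [] => simp [pvALoop, pvBScan]
  | c :: cs =>
    by_cases hc : c = ' ' || (c = '-' && !cs.isEmpty)
    · have hcs : c = ' ' ∨ c = '-' := by
        rcases Bool.or_eq_true_iff.mp hc with h | h
        · exact Or.inl (by simpa using h)
        · exact Or.inr (by simpa using (Bool.and_eq_true_iff.mp h).1)
      have hb : pvBScan none (c :: cs) = pvBScan (some c) cs := by
        rcases hcs with h | h <;> simp [pvBScan, h]
      rw [hb, pvBScan_some c cs hcs]
      rw [pvALoop]
      rw [if_pos hc]
      have hg := pvGobble_snd_len c cs
      have hfst := pvGobble_fst_mem c cs hcs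
      rcases hgob : pvGobble c cs with ⟨s, rest⟩
      rw [hgob] at hg hfst
      match rest with
      | [] => simp
      | d :: ds =>
        simp only
        rw [ih ds.length (by simp at hg ⊢; omega) ds _ rfl]
        rw [sep_toString s hfst]
        simp only [String.append_assoc]
    · have hb : pvBScan none (c :: cs) = if c = ' ' || c = '-' then pvBScan (some c) cs else pvBScan none cs := by
        simp [pvBScan]
      rw [pvALoop, if_neg hc]
      by_cases hsep : c = ' ' || c = '-'
      · -- only possible when c = '-' and cs = []
        have hc' : c = '-' ∧ cs = [] := by
          simp only [Bool.or_eq_true, Bool.and_eq_true, Bool.not_eq_true'] at hc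
          rcases Bool.or_eq_true_iff.mp hsep with h | h
          · exact absurd (Or.inl h) hc
          · refine ⟨by simpa using h, ?_⟩
            by_contra hne
            exact hc (Or.inr ⟨h, by simp [hne]⟩)
        rcases hc' with ⟨h1, h2⟩
        subst h1; subst h2
        simp [pvALoop, pvBScan]
      · rw [hb, if_neg hsep]
        exact ih cs.length (by simp) cs abrv rfl

-- ===== VERDICT (by name: the statement is the Claim_ definition above) =====
theorem abbrev_prenom_spec : Claim_equal_abbrev_prenom := by
  intro prenom _
  unfold Spec_abbrev_prenom abbrev_prenom abbrev_prenom_alt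
  cases h : (PySem.Str.strip (PySem.Str.replace prenom "." " ")).toList with
  | nil => simp
  | cons c cs =>
    simp only [pvALoop_eq]
    split <;> simp
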